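-- pv_equiv track=rewrite | github.com/nicolewhite/cycli | cycli/completer.py | last_alphabetic_chunk
-- ===== SOURCE A (Python) =====
-- def last_alphabetic_chunk(chars):
--     chars = list(chars)
--     chars.reverse()
--
--     keep = []
--
--     for c in chars:
--         if c.isalpha():
--             keep.append(c)
--         else:
--             break
--
--     keep.reverse()
--     return "".join(keep)
-- ===== SOURCE B (Python) =====
-- def last_alphabetic_chunk(chars):
--     chars = list(chars)
--     start = 0
--     for i, c in enumerate(chars):
--         if not c.isalpha():
--             start = i + 1
--     return "".join(chars[start:])
-- ===== Notes on version B (the rewrite author's own statement) =====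
-- stated objective: alternative
-- what changed: Replaces reverse + accumulate-with-break + reverse by one forward pass that maintains the index after the last non-alphabetic character, then slices from it.
import Mathlib
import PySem

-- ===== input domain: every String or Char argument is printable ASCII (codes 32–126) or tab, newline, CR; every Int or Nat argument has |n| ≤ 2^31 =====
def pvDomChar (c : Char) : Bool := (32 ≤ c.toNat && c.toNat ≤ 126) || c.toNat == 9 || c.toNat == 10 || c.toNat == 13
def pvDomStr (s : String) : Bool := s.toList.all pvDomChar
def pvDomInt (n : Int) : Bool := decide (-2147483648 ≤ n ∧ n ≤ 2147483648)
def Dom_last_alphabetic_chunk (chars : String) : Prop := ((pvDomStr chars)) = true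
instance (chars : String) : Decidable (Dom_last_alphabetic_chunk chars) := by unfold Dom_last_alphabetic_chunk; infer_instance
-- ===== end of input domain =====

-- B replaces reverse + accumulate-with-break + reverse by one forward pass keeping the
-- index after the last non-alphabetic character, then a slice; equivalence proved on Dom.
-- ===== PORT A =====
-- loop 'for c in chars: append while isalpha else break' over the reversed list
def pvTakeA : List Char → List Char
  | [] => []
  | c :: cs => if PySem.Chars.isalpha c then c :: pvTakeA cs else []

def last_alphabetic_chunk (chars : String) : String :=
  let chars := chars.toList.reverse
  let keep := pvTakeA chars
  String.ofList keep.reverse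

-- ===== PORT B =====
-- forward pass: start := i+1 at every non-alphabetic position i
def pvStartB (cs : List Char) : Int :=
  (PySem.List.enumerate cs).foldl
    (fun start p => if !(PySem.Chars.isalpha p.2) then p.1 + 1 else start) 0

def last_alphabetic_chunk_alt (chars : String) : String :=
  let cs := chars.toList
  String.ofList (PySem.List.slice cs (some (pvStartB cs)) none)

-- ===== PRECONDITION & SPEC =====
def Spec_last_alphabetic_chunk (chars : String) (out : String) : Prop := out = last_alphabetic_chunk_alt chars
instance (chars : String) (out : String) : Decidable (Spec_last_alphabetic_chunk chars out) := by unfold Spec_last_alphabetic_chunk; infer_instance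

-- ===== CLAIM (what is proved, stated in full; the proofs are below) =====
def Claim_equal_last_alphabetic_chunk : Prop := ∀ (chars : String), Dom_last_alphabetic_chunk chars → Spec_last_alphabetic_chunk chars (last_alphabetic_chunk chars)

-- ===== LEMMAS AND PROOFS =====

theorem pvStartB_append (cs : List Char) (c : Char) :
    pvStartB (cs ++ [c]) =
      if PySem.Chars.isalpha c then pvStartB cs else (cs.length : Int) + 1 := by
  unfold pvStartB
  rw [PySem.List.enumerate_append, List.foldl_append]
  simp [PySem.List.enumerate]
  by_cases h : PySem.Chars.isalpha c <;> simp [h]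

theorem pvStartB_bounds (cs : List Char) : 0 ≤ pvStartB cs ∧ pvStartB cs ≤ cs.length := by
  induction cs using List.reverseRecOn with
  | nil => simp [pvStartB, PySem.List.enumerate]
  | append_singleton cs c ih =>
      rw [pvStartB_append]
      by_cases h : PySem.Chars.isalpha c <;> simp [h] <;> omega

theorem pvMain (cs : List Char) :
    cs.drop (pvStartB cs).toNat = (pvTakeA cs.reverse).reverse := by
  induction cs using List.reverseRecOn with
  | nil => simp [pvStartB, PySem.List.enumerate, pvTakeA]
  | append_singleton cs c ih =>
      rw [pvStartB_append, List.reverse_append]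
      by_cases h : PySem.Chars.isalpha c
      · rw [if_pos h]
        show (cs ++ [c]).drop (pvStartB cs).toNat = (pvTakeA (c :: cs.reverse)).reverse
        rw [List.drop_append_of_le_length (by have := pvStartB_bounds cs; omega), ih]
        simp [pvTakeA, h]
      · rw [if_neg h]
        show (cs ++ [c]).drop ((cs.length : Int) + 1).toNat = (pvTakeA (c :: cs.reverse)).reverse
        have hl : ((cs.length : Int) + 1).toNat = cs.length + 1 := by omega
        rw [hl]
        simp [pvTakeA, h]

-- ===== VERDICT (by name: the statement is the Claim_ definition above) =====
theorem last_alphabetic_chunk_spec : Claim_equal_last_alphabetic_chunk := by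
  intro chars _
  show _ = _
  simp only [last_alphabetic_chunk, last_alphabetic_chunk_alt]
  rw [PySem.List.slice_from, pvMain]
  exact (pvStartB_bounds _).1
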